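-- pv_equiv track=rewrite | github.com/9nightss/KOD8_ENC | kod8_engine.py | op_block_shuffle
-- ===== SOURCE A (Python) =====
-- KOD8_KEY      = "86247931"
--
-- def op_block_shuffle(text: str, encrypt: bool, block_size: int = 8, **_) -> str:
--     """
--     BLOCK SHUFFLE  (key-derived permutation)
--     -----------------------------------------
--     Encrypt: divide the string into blocks of `block_size` chars, reorder
--     blocks by a permutation derived from KOD8_KEY.
--
--         Key digits "86247931" → raw positions [8,6,2,4,7,9,3,1].
--         Reduce mod num_blocks, deduplicate (first-seen), fill remaining
--         indices in ascending order to complete the permutation.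
--
--     Decrypt: compute the inverse permutation and reorder back.
--
--     Last block null-padded to `block_size` if needed; padding stripped on
--     decrypt.
--
--     Why it's here: block-level transposition — moves entire 8-char chunks,
--     destroying file-format structure that spans large byte ranges (JPEG
--     headers, PDF cross-reference tables).  Safe at any chain position.
--     """
--     if not text:
--         return text
--
--     pad    = (-len(text)) % block_size
--     padded = text + "\x00" * pad
--     blocks = [padded[i:i + block_size] for i in range(0, len(padded), block_size)]
--     n      = len(blocks)
--
--     raw  = [int(d) % n for d in KOD8_KEY]
--     seen, perm = set(), []
--     for v in raw:
--         if v not in seen: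
--             perm.append(v); seen.add(v)
--     for i in range(n):
--         if i not in seen:
--             perm.append(i)
--
--     if encrypt:
--         result_blocks = [blocks[perm[i]] for i in range(n)]
--     else:
--         inv = [0] * n
--         for i, p in enumerate(perm):
--             inv[p] = i
--         result_blocks = [blocks[inv[i]] for i in range(n)]
--
--     result = "".join(result_blocks)
--     return result.rstrip("\x00") if not encrypt else result
-- ===== SOURCE B (Python) =====
-- KOD8_KEY = "86247931"
--
-- def op_block_shuffle(text: str, encrypt: bool, block_size: int = 8, **_) -> str:
--     if not text:
--         return text
--
--     pad = (-len(text)) % block_size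
--     padded = text + "\x00" * pad
--     blocks = [padded[i:i + block_size] for i in range(0, len(padded), block_size)]
--     n = len(blocks)
--
--     # Rank of block index i: position of its first appearance among the key
--     # digits reduced mod n, or past-the-key (keeping ascending order) if it
--     # never appears.  Sorting range(n) by this rank IS the key permutation.
--     digs = [int(d) % n for d in KOD8_KEY]
--
--     def rank(i):
--         return digs.index(i) if i in digs else len(KOD8_KEY) + i
--
--     perm = sorted(range(n), key=rank)
--
--     if encrypt:
--         return "".join(blocks[p] for p in perm)
--     # decrypt: pair each block with its plaintext position and sort the pairs
--     return "".join(b for _, b in sorted(zip(perm, blocks), key=lambda q: q[0])).rstrip("\x00")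
-- ===== Notes on version B (the rewrite author's own statement) =====
-- stated objective: alternative
-- what changed: B derives the permutation by sorting range(n) under a rank key (first position among the reduced key digits, else past-the-key ascending) instead of A's seen-set dedup loop plus ascending fill, and decrypts by sorting (position, block) pairs instead of building and gathering through an inverse-permutation array.
import Mathlib
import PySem

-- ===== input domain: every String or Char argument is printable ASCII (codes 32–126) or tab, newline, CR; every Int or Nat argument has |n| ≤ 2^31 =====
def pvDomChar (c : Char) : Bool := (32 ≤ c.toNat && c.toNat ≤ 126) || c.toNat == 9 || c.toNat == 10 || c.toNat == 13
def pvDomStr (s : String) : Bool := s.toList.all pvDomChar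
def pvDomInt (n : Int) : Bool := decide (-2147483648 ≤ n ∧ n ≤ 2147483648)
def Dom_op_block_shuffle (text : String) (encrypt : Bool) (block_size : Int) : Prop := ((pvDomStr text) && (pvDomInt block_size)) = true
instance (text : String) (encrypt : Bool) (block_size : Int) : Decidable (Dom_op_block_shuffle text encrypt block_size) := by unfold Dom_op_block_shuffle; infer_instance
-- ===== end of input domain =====

-- B derives the permutation by sorting range(n) under a rank key instead of A's
-- seen-set dedup loop plus ascending fill, and decrypts by sorting (position, block)
-- pairs instead of building an inverse-permutation array (objective: alternative).

-- module constant KOD8_KEY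
def pvKOD8_KEY : List Char := "86247931".toList

-- ===== PORT A =====
def op_block_shuffle (text : String) (encrypt : Bool) (block_size : Int) : String :=
  let cs := text.toList
  if cs = [] then text
  else
    let pad : Int := PySem.Int.mod (-(cs.length : Int)) block_size
    let padded : List Char := cs ++ PySem.List.pyRepeat ['\x00'] pad
    let blocks : List (List Char) :=
      (PySem.List.pyRange 0 ((padded.length : Int)) block_size).map
        (fun i => PySem.List.slice padded (some i) (some (i + block_size)))
    let n : Int := (blocks.length : Int)
    -- int(d) % n for the digit chars of the constant key: int(d) = d.toNat - 48, exact on '0'..'9'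
    let raw : List Int := pvKOD8_KEY.map (fun d => PySem.Int.mod ((d.toNat : Int) - 48) n)
    let sp := raw.foldl
      (fun st v => if PySem.Set.contains st.1 v then st else (PySem.Set.add st.1 v, st.2 ++ [v]))
      ((PySem.Set.empty : PySem.Set Int), ([] : List Int))
    let seen := sp.1
    let perm := (PySem.List.pyRange 0 n 1).foldl
      (fun acc i => if !(PySem.Set.contains seen i) then acc ++ [i] else acc) sp.2
    let result_blocks :=
      if encrypt then
        -- blocks[perm[i]]: both indices in range on every input A returns on; pyGetD exact there
        (PySem.List.pyRange 0 n 1).map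
          (fun i => PySem.List.pyGetD blocks (PySem.List.pyGetD perm i 0) [])
      else
        let inv := (PySem.List.enumerate perm 0).foldl
          (fun inv ip => PySem.List.pySetD inv ip.2 ip.1) (List.replicate blocks.length (0 : Int))
        (PySem.List.pyRange 0 n 1).map
          (fun i => PySem.List.pyGetD blocks (PySem.List.pyGetD inv i 0) [])
    let result := PySem.Chars.join [] result_blocks
    -- result.rstrip("\x00"): drop trailing '\x00' chars — exact port of str.rstrip with that char set
    if !encrypt then String.ofList ((result.reverse.dropWhile (fun c => c == '\x00')).reverse)
    else String.ofList result

-- ===== PORT B =====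
def op_block_shuffle_alt (text : String) (encrypt : Bool) (block_size : Int) : String :=
  let cs := text.toList
  if cs = [] then text
  else
    let pad : Int := PySem.Int.mod (-(cs.length : Int)) block_size
    let padded : List Char := cs ++ PySem.List.pyRepeat ['\x00'] pad
    let blocks : List (List Char) :=
      (PySem.List.pyRange 0 ((padded.length : Int)) block_size).map
        (fun i => PySem.List.slice padded (some i) (some (i + block_size)))
    let n : Int := (blocks.length : Int)
    let digs : List Int := pvKOD8_KEY.map (fun d => PySem.Int.mod ((d.toNat : Int) - 48) n)
    -- rank(i) = digs.index(i) if i in digs else len(KOD8_KEY) + i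
    let rank : Int → Int := fun i =>
      match PySem.List.index? digs i with
      | some j => (j : Int)
      | none => (pvKOD8_KEY.length : Int) + i
    let perm : List Int := PySem.List.sorted (PySem.List.pyRange 0 n 1) rank false
    if encrypt then
      -- blocks[p]: every p in perm is a valid block index; pyGetD exact there
      String.ofList (PySem.Chars.join [] (perm.map (fun p => PySem.List.pyGetD blocks p [])))
    else
      let pairs := PySem.List.sorted (perm.zip blocks) (fun q => q.1) false
      let joined := PySem.Chars.join [] (pairs.map (fun q => q.2))
      -- .rstrip("\x00"): drop trailing '\x00' chars — exact port of str.rstrip with that char set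
      String.ofList ((joined.reverse.dropWhile (fun c => c == '\x00')).reverse)

-- ===== PRECONDITION & SPEC =====
-- Pre_ excludes exactly the inputs where A raises (ZeroDivisionError): nonempty text with block_size ≤ 0.
def Pre_op_block_shuffle (text : String) (encrypt : Bool) (block_size : Int) : Prop :=
  text.toList = [] ∨ 0 < block_size
instance (text : String) (encrypt : Bool) (block_size : Int) : Decidable (Pre_op_block_shuffle text encrypt block_size) := by unfold Pre_op_block_shuffle; infer_instance
def pvWitness_op_block_shuffle : String × Bool × Int := ("hello world!", true, 3)
def Spec_op_block_shuffle (text : String) (encrypt : Bool) (block_size : Int) (out : String) : Prop := out = op_block_shuffle_alt text encrypt block_size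
instance (text : String) (encrypt : Bool) (block_size : Int) (out : String) : Decidable (Spec_op_block_shuffle text encrypt block_size out) := by unfold Spec_op_block_shuffle; infer_instance

-- ===== CLAIM (what is proved, stated in full; the proofs are below) =====
def Claim_equal_op_block_shuffle : Prop := ∀ (text : String) (encrypt : Bool) (block_size : Int), Dom_op_block_shuffle text encrypt block_size → Pre_op_block_shuffle text encrypt block_size → Spec_op_block_shuffle text encrypt block_size (op_block_shuffle text encrypt block_size)

-- ===== LEMMAS AND PROOFS =====

-- A's dedup loop over a pair accumulator is Set.update on both components.
lemma pv_dedup_fold (raw : List Int) : ∀ (s : PySem.Set Int),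
    raw.foldl
      (fun st v => if PySem.Set.contains st.1 v then st else (PySem.Set.add st.1 v, st.2 ++ [v]))
      (s, s)
    = (PySem.Set.update s raw, PySem.Set.update s raw) := by
  induction raw with
  | nil => intro s; simp [PySem.Set.update]
  | cons v t ih =>
    intro s
    rw [List.foldl_cons, PySem.Set.update_cons]
    by_cases hv : v ∈ s
    · have hc : PySem.Set.contains s v = true := (PySem.Set.contains_iff s v).mpr hv
      simp only [hc, if_true, PySem.Set.add_of_mem hv]
      exact ih s
    · have hc : PySem.Set.contains s v = false := by
        simpa using fun h => hv ((PySem.Set.contains_iff s v).mp h)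
      simp only [hc, if_false, PySem.Set.add_of_not_mem hv, Bool.false_eq_true]
      exact ih (s ++ [v])

-- reading position j of a scatter fold with distinct in-range targets: the (unique) write to j
lemma pv_scatter_getD {β : Type} (d : β) :
    ∀ (l : List (Int × β)) (init : List β) (j : Nat),
    (l.map Prod.fst).Nodup → (∀ q ∈ l, 0 ≤ q.1 ∧ q.1 < (init.length : Int)) → j < init.length →
    PySem.List.pyGetD (l.foldl (fun o q => PySem.List.pySetD o q.1 q.2) init) (j : Int) d
      = ((l.find? (fun q => q.1 == (j : Int))).map Prod.snd).getD
          (PySem.List.pyGetD init (j : Int) d) := by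
  intro l
  induction l with
  | nil => intro init j _ _ _; simp
  | cons q t ih =>
    intro init j hnd hbound hj
    have hq := hbound q (by simp)
    have hqn : q.1 = ((q.1.toNat : Nat) : Int) := (Int.toNat_of_nonneg hq.1).symm
    have hqlt : q.1.toNat < init.length := by omega
    have hlen : (PySem.List.pySetD init q.1 q.2).length = init.length :=
      PySem.List.length_pySetD _ _ _
    rw [List.foldl_cons, List.find?_cons]
    have ihv := ih (PySem.List.pySetD init q.1 q.2) j (by simpa using hnd.of_cons)
      (fun r hr => by rw [hlen]; exact hbound r (List.mem_cons_of_mem _ hr))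
      (by omega)
    rw [ihv]
    by_cases hje : q.1 = (j : Int)
    · have : (q.1 == (j : Int)) = true := by simp [hje]
      rw [this]
      have hnone : t.find? (fun r => r.1 == (j : Int)) = none := by
        rw [List.find?_eq_none]
        intro r hr
        have : r.1 ≠ q.1 := by
          intro he
          have := (List.nodup_cons.mp hnd).1
          exact this (he ▸ List.mem_map_of_mem hr)
        simp [hje ▸ this]
      rw [hnone]
      simp only [Option.map_none, Option.getD_none, Option.map_some, Option.getD_some]
      rw [hqn, PySem.List.pyGetD_pySetD_natCast _ _ _ _ _ hqlt]
      have : j = q.1.toNat := by omega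
      simp [this]
    · have : (q.1 == (j : Int)) = false := by simp [hje]
      rw [this]
      congr 1
      rw [hqn, PySem.List.pyGetD_pySetD_natCast _ _ _ _ _ hqlt]
      have : j ≠ q.1.toNat := by omega
      simp [this]

-- A's permutation P = dedup(raw) ++ (missing indices ascending) is a nodup enumeration of 0..n-1
lemma pv_perm_props (n : Nat) (raw : List Int)
    (hraw : ∀ v ∈ raw, 0 ≤ v ∧ v < (n : Int)) :
    let P := PySem.Set.ofList raw ++
      (PySem.List.pyRange 0 ((n : Int)) 1).filter
        (fun x => !(PySem.Set.contains (PySem.Set.ofList raw) x));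
    P.Nodup ∧ P.length = n ∧ (∀ x ∈ P, 0 ≤ x ∧ x < (n : Int)) ∧
      (∀ j : Nat, j < n → (j : Int) ∈ P) := by
  intro P
  have hR : PySem.List.pyRange 0 ((n : Int)) 1 = List.map (fun k : Nat => (k : Int)) (List.range n) :=
    PySem.List.pyRange_zero_natCast n
  have hRnodup : (PySem.List.pyRange 0 ((n : Int)) 1).Nodup := by
    rw [hR]
    exact List.nodup_range.map (fun a b h => by exact_mod_cast h)
  have hmemR : ∀ x : Int, x ∈ PySem.List.pyRange 0 ((n : Int)) 1 ↔ 0 ≤ x ∧ x < (n : Int) := by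
    intro x
    rw [hR]
    constructor
    · rintro hx
      obtain ⟨k, hk, rfl⟩ := List.mem_map.mp hx
      have := List.mem_range.mp hk
      constructor <;> omega
    · rintro ⟨h0, h1⟩
      refine List.mem_map.mpr ⟨x.toNat, List.mem_range.mpr (by omega), by omega⟩
  have hfirstmem : ∀ x ∈ PySem.Set.ofList raw, 0 ≤ x ∧ x < (n : Int) := by
    intro x hx
    exact hraw x ((PySem.Set.mem_ofList raw x).mp hx)
  have hfnodup := PySem.Set.nodup_ofList raw
  have hrestnodup := hRnodup.filter (fun x => !(PySem.Set.contains (PySem.Set.ofList raw) x))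
  have hdisj : ∀ x ∈ (PySem.List.pyRange 0 ((n : Int)) 1).filter
      (fun x => !(PySem.Set.contains (PySem.Set.ofList raw) x)), x ∉ PySem.Set.ofList raw := by
    intro x hx hmem
    have := (List.mem_filter.mp hx).2
    rw [Bool.not_eq_eq_eq_not, Bool.not_true] at this
    exact (Bool.eq_false_iff.mp this) ((PySem.Set.contains_iff _ x).mpr hmem)
  have hnodup : P.Nodup := by
    rw [List.nodup_append]
    exact ⟨hfnodup, hrestnodup, fun a ha b hb he => hdisj b hb (he ▸ ha)⟩
  have hlen : P.length = n := by
    have hperm : ((PySem.List.pyRange 0 ((n : Int)) 1).filter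
        (fun x => PySem.Set.contains (PySem.Set.ofList raw) x)).Perm (PySem.Set.ofList raw) := by
      rw [List.perm_ext_iff_of_nodup (hRnodup.filter _) hfnodup]
      intro a
      rw [List.mem_filter, hmemR, PySem.Set.contains_iff]
      constructor
      · exact fun h => h.2
      · intro h
        exact ⟨hfirstmem a h, h⟩
    have hsplit := List.length_eq_length_filter_add
      (l := PySem.List.pyRange 0 ((n : Int)) 1)
      (fun x => PySem.Set.contains (PySem.Set.ofList raw) x)
    have hRlen : (PySem.List.pyRange 0 ((n : Int)) 1).length = n := by
      rw [hR]; simp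
    simp only [List.length_append, P]
    rw [← hperm.length_eq]
    omega
  refine ⟨hnodup, hlen, ?_, ?_⟩
  · intro x hx
    rcases List.mem_append.mp hx with h | h
    · exact hfirstmem x h
    · exact (hmemR x).mp (List.mem_filter.mp h).1
  · intro j hj
    by_cases hm : (j : Int) ∈ PySem.Set.ofList raw
    · exact List.mem_append.mpr (Or.inl hm)
    · refine List.mem_append.mpr (Or.inr (List.mem_filter.mpr ⟨(hmemR _).mpr ⟨by omega, by omega⟩, ?_⟩))
      rw [Bool.not_eq_eq_eq_not, Bool.not_true, Bool.eq_false_iff]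
      intro hc
      exact hm ((PySem.Set.contains_iff _ _).mp hc)

-- along dedup(raw), first-occurrence positions in raw are strictly increasing
lemma pv_ofList_idx_lt (raw : List Int) :
    (PySem.Set.ofList raw).Pairwise (fun a b =>
      ∀ ja jb, PySem.List.index? raw a = some ja → PySem.List.index? raw b = some jb → ja < jb) := by
  induction raw using List.reverseRecOn with
  | nil => simp [PySem.Set.ofList]
  | append_singleton t x ih =>
    rw [PySem.Set.ofList_append_singleton]
    by_cases hx : x ∈ PySem.Set.ofList t
    · have hxt : x ∈ t := (PySem.Set.mem_ofList t x).mp hx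
      rw [PySem.Set.add_of_mem hx]
      refine ih.imp_of_mem ?_
      intro a b ha hb hR ja jb hja hjb
      have hat : a ∈ t := (PySem.Set.mem_ofList t a).mp ha
      have hbt : b ∈ t := (PySem.Set.mem_ofList t b).mp hb
      rw [PySem.List.index?_append_of_mem _ hat] at hja
      rw [PySem.List.index?_append_of_mem _ hbt] at hjb
      exact hR ja jb hja hjb
    · have hxt : x ∉ t := fun h => hx ((PySem.Set.mem_ofList t x).mpr h)
      rw [PySem.Set.add_of_not_mem hx]
      rw [List.pairwise_append]
      refine ⟨?_, by simp, ?_⟩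
      · refine ih.imp_of_mem ?_
        intro a b ha hb hR ja jb hja hjb
        have hat : a ∈ t := (PySem.Set.mem_ofList t a).mp ha
        have hbt : b ∈ t := (PySem.Set.mem_ofList t b).mp hb
        rw [PySem.List.index?_append_of_mem _ hat] at hja
        rw [PySem.List.index?_append_of_mem _ hbt] at hjb
        exact hR ja jb hja hjb
      · intro a ha b hb ja jb hja hjb
        have hbx : b = x := by simpa using hb
        subst hbx
        have hat : a ∈ t := (PySem.Set.mem_ofList t a).mp ha
        rw [PySem.List.index?_append_of_mem _ hat] at hja
        rw [PySem.List.index?_append_singleton_self t b hxt] at hjb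
        obtain ⟨hlt, _, _⟩ := PySem.List.getElem_of_index?_eq_some hja
        have hj : t.length = jb := by simpa using hjb
        omega

-- B's sorted-by-rank range equals A's permutation P
lemma pv_sorted_rank_eq (n : Nat) (raw : List Int)
    (hraw : ∀ v ∈ raw, 0 ≤ v ∧ v < (n : Int)) (hlen : (raw.length : Int) ≤ (pvKOD8_KEY.length : Int)) :
    PySem.List.sorted (PySem.List.pyRange 0 ((n : Int)) 1)
      (fun i => match PySem.List.index? raw i with
        | some j => (j : Int)
        | none => (pvKOD8_KEY.length : Int) + i) false
    = PySem.Set.ofList raw ++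
      (PySem.List.pyRange 0 ((n : Int)) 1).filter
        (fun x => !(PySem.Set.contains (PySem.Set.ofList raw) x)) := by
  obtain ⟨hPnodup, hPlen, hPmem, hPfull⟩ := pv_perm_props n raw hraw
  set P : List Int := PySem.Set.ofList raw ++
      (PySem.List.pyRange 0 ((n : Int)) 1).filter
        (fun x => !(PySem.Set.contains (PySem.Set.ofList raw) x)) with hP
  have hR : PySem.List.pyRange 0 ((n : Int)) 1 = List.map (fun k : Nat => (k : Int)) (List.range n) :=
    PySem.List.pyRange_zero_natCast n
  have hRnodup : (PySem.List.pyRange 0 ((n : Int)) 1).Nodup := by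
    rw [hR]
    exact List.nodup_range.map (fun a b h => by exact_mod_cast h)
  have hmemR : ∀ x : Int, x ∈ PySem.List.pyRange 0 ((n : Int)) 1 ↔ 0 ≤ x ∧ x < (n : Int) := by
    intro x
    rw [hR]
    constructor
    · rintro hx
      obtain ⟨k, hk, rfl⟩ := List.mem_map.mp hx
      have := List.mem_range.mp hk
      constructor <;> omega
    · rintro ⟨h0, h1⟩
      exact List.mem_map.mpr ⟨x.toNat, List.mem_range.mpr (by omega), by omega⟩
  apply PySem.List.sorted_eq_of_perm_of_pairwise_lt
  · rw [List.perm_ext_iff_of_nodup hPnodup hRnodup]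
    intro x
    rw [hmemR]
    constructor
    · exact hPmem x
    · rintro ⟨h0, h1⟩
      have := hPfull x.toNat (by omega)
      simpa [Int.toNat_of_nonneg h0] using this
  · rw [hP, List.pairwise_append]
    refine ⟨?_, ?_, ?_⟩
    · refine (pv_ofList_idx_lt raw).imp_of_mem ?_
      intro a b ha hb hRel
      have hat : a ∈ raw := (PySem.Set.mem_ofList raw a).mp ha
      have hbt : b ∈ raw := (PySem.Set.mem_ofList raw b).mp hb
      obtain ⟨ja, hja⟩ := Option.isSome_iff_exists.mp ((PySem.List.index?_isSome_iff raw a).mpr hat)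
      obtain ⟨jb, hjb⟩ := Option.isSome_iff_exists.mp ((PySem.List.index?_isSome_iff raw b).mpr hbt)
      have := hRel ja jb hja hjb
      simp only [hja, hjb]
      exact_mod_cast this
    · have hpw : (PySem.List.pyRange 0 ((n : Int)) 1).Pairwise (· < ·) := by
        rw [hR, List.pairwise_map]
        exact (List.pairwise_lt_range).imp (fun h => by exact_mod_cast h)
      refine (hpw.filter _).imp_of_mem ?_
      intro a b ha hb hab
      have hna : a ∉ raw := by
        have := (List.mem_filter.mp ha).2
        simp only [Bool.not_eq_eq_eq_not, Bool.not_true] at this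
        intro hm
        exact (Bool.eq_false_iff.mp this)
          ((PySem.Set.contains_iff _ a).mpr ((PySem.Set.mem_ofList raw a).mpr hm))
      have hnb : b ∉ raw := by
        have := (List.mem_filter.mp hb).2
        simp only [Bool.not_eq_eq_eq_not, Bool.not_true] at this
        intro hm
        exact (Bool.eq_false_iff.mp this)
          ((PySem.Set.contains_iff _ b).mpr ((PySem.Set.mem_ofList raw b).mpr hm))
      have hia : PySem.List.index? raw a = none := (PySem.List.index?_eq_none_iff raw a).mpr hna
      have hib : PySem.List.index? raw b = none := (PySem.List.index?_eq_none_iff raw b).mpr hnb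
      simp only [hia, hib]
      exact (add_lt_add_iff_left _).mpr hab
    · intro a ha b hb
      have hat : a ∈ raw := (PySem.Set.mem_ofList raw a).mp ha
      obtain ⟨ja, hja⟩ := Option.isSome_iff_exists.mp ((PySem.List.index?_isSome_iff raw a).mpr hat)
      obtain ⟨hjalt, _, _⟩ := PySem.List.getElem_of_index?_eq_some hja
      have hnb : b ∉ raw := by
        have := (List.mem_filter.mp hb).2
        simp only [Bool.not_eq_eq_eq_not, Bool.not_true] at this
        intro hm
        exact (Bool.eq_false_iff.mp this)
          ((PySem.Set.contains_iff _ b).mpr ((PySem.Set.mem_ofList raw b).mpr hm))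
      have hib : PySem.List.index? raw b = none := (PySem.List.index?_eq_none_iff raw b).mpr hnb
      have hb0 : 0 ≤ b := ((hmemR b).mp (List.mem_filter.mp hb).1).1
      simp only [hja, hib]
      have h1 : (ja : Int) < (raw.length : Int) := by exact_mod_cast hjalt
      have h2 : (raw.length : Int) ≤ (pvKOD8_KEY.length : Int) + b := le_add_of_le_of_nonneg hlen hb0
      exact lt_of_lt_of_le h1 h2

-- find? on enumerate is index?
lemma pv_find?_enumerate (v : Int) : ∀ (P : List Int) (s : Int),
    List.find? (fun ip => ip.2 == v) (PySem.List.enumerate P s)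
      = (PySem.List.index? P v).map (fun k => (s + (k : Int), v)) := by
  intro P
  induction P with
  | nil => intro s; simp [PySem.List.enumerate]
  | cons x t ih =>
    intro s
    by_cases hx : x = v
    · subst hx
      rw [PySem.List.enumerate_cons, List.find?_cons, PySem.List.index?_cons_self]
      simp
    · rw [PySem.List.enumerate_cons, List.find?_cons,
        PySem.List.index?_cons_of_ne (v := v) (xs := t) hx, ih (s + 1)]
      have hne : (((s, x) : Int × Int).2 == v) = false := by simp [hx]
      rw [hne]
      cases PySem.List.index? t v with
      | none => rfl
      | some k =>
        simp [Prod.ext_iff]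
        ring

-- A's inverse-array gather equals B's sort of (position, block) pairs
lemma pv_decrypt_eq (blocks : List (List Char)) (P : List Int)
    (hnodup : P.Nodup) (hlen : P.length = blocks.length)
    (hmem : ∀ x ∈ P, 0 ≤ x ∧ x < (blocks.length : Int))
    (hfull : ∀ j : Nat, j < blocks.length → (j : Int) ∈ P) :
    (let inv := (PySem.List.enumerate P 0).foldl
        (fun inv ip => PySem.List.pySetD inv ip.2 ip.1) (List.replicate blocks.length (0 : Int));
     (PySem.List.pyRange 0 ((blocks.length : Int)) 1).map
        (fun i => PySem.List.pyGetD blocks (PySem.List.pyGetD inv i 0) []))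
    = (PySem.List.sorted (P.zip blocks) (fun q => q.1) false).map (fun q => q.2) := by
  dsimp only
  have hkey : ∀ j : Nat, j < blocks.length →
      ∃ k, PySem.List.index? P ((j : Int)) = some k ∧ ∃ (hk : k < P.length), P[k] = (j : Int) := by
    intro j hj
    obtain ⟨k, hk⟩ := Option.isSome_iff_exists.mp
      ((PySem.List.index?_isSome_iff P ((j : Int))).mpr (hfull j hj))
    obtain ⟨hklt, hPk, _⟩ := PySem.List.getElem_of_index?_eq_some hk
    exact ⟨k, hk, hklt, hPk⟩
  set LL := (List.range blocks.length).map
    (fun j => (((j : Nat) : Int),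
      PySem.List.pyGetD blocks ((((PySem.List.index? P ((j : Int))).getD 0 : Nat)) : Int) []))
    with hLL
  have hzl : (P.zip blocks).length = blocks.length := by simp [hlen]
  have hsorted : PySem.List.sorted (P.zip blocks) (fun q => q.1) false = LL := by
    apply PySem.List.sorted_eq_of_perm_of_pairwise_lt
    · have hLnodup : LL.Nodup := by
        rw [hLL]
        exact List.nodup_range.map (fun a b h => by
          have := congrArg Prod.fst h
          simpa using this)
      have hznodup : (P.zip blocks).Nodup :=
        List.Nodup.of_map Prod.fst (by rw [List.map_fst_zip (le_of_eq hlen)]; exact hnodup)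
      rw [List.perm_ext_iff_of_nodup hLnodup hznodup]
      intro q
      constructor
      · intro hq
        rw [hLL] at hq
        obtain ⟨j, hjr, rfl⟩ := List.mem_map.mp hq
        have hj : j < blocks.length := List.mem_range.mp hjr
        obtain ⟨k, hk, hklt, hPk⟩ := hkey j hj
        have hkb : k < blocks.length := by omega
        refine List.mem_iff_getElem.mpr ⟨k, by omega, ?_⟩
        rw [List.getElem_zip]
        rw [hk]
        simp only [Option.getD_some]
        rw [PySem.List.pyGetD_eq_getElem blocks [] (by omega) (by exact_mod_cast hkb)]
        rw [hPk]
        simp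
      · intro hq
        obtain ⟨i, hi, rfl⟩ := List.mem_iff_getElem.mp hq
        have him : i < blocks.length := by omega
        have hiP : i < P.length := by omega
        rw [List.getElem_zip]
        have hPmem' := hmem (P[i]) (List.getElem_mem hiP)
        have hj : (P[i]).toNat < blocks.length := by omega
        obtain ⟨k, hk, hklt, hPk⟩ := hkey (P[i]).toNat hj
        have hcast : (((P[i]).toNat : Nat) : Int) = P[i] := Int.toNat_of_nonneg hPmem'.1
        have hki : k = i := by
          rw [hcast] at hPk
          exact (List.Nodup.getElem_inj_iff hnodup).mp hPk
        rw [hLL]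
        refine List.mem_map.mpr ⟨(P[i]).toNat, List.mem_range.mpr hj, ?_⟩
        rw [hk]
        simp only [Option.getD_some, hki]
        rw [PySem.List.pyGetD_eq_getElem blocks [] (by omega) (by exact_mod_cast him)]
        rw [hcast]
        simp
    · rw [hLL, List.pairwise_map]
      exact (List.pairwise_lt_range).imp (fun h => by simpa using h)
  rw [hsorted, hLL, List.map_map]
  rw [PySem.List.pyRange_zero_natCast blocks.length, List.map_map]
  apply List.map_congr_left
  intro j hjr
  have hj : j < blocks.length := List.mem_range.mp hjr
  obtain ⟨k, hk, hklt, hPk⟩ := hkey j hj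
  simp only [Function.comp]
  -- inv fold in pair-scatter form
  have hfoldA : (PySem.List.enumerate P 0).foldl
      (fun inv ip => PySem.List.pySetD inv ip.2 ip.1) (List.replicate blocks.length (0 : Int))
      = ((PySem.List.enumerate P 0).map (fun ip => ((ip.2, ip.1) : Int × Int))).foldl
          (fun o q => PySem.List.pySetD o q.1 q.2) (List.replicate blocks.length (0 : Int)) := by
    exact (List.foldl_map (f := fun ip : Int × Int => ((ip.2, ip.1) : Int × Int))
      (g := fun o q => PySem.List.pySetD o q.1 q.2)
      (l := PySem.List.enumerate P 0) (init := List.replicate blocks.length (0 : Int))).symm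
  rw [hfoldA]
  set lA := (PySem.List.enumerate P 0).map (fun ip => ((ip.2, ip.1) : Int × Int)) with hlA
  have hfstA : lA.map Prod.fst = P := by
    rw [hlA, List.map_map]
    exact PySem.List.map_snd_enumerate P 0
  have hbndA : ∀ q ∈ lA, 0 ≤ q.1 ∧ q.1 < ((List.replicate blocks.length (0 : Int)).length : Int) := by
    intro q hq
    have : q.1 ∈ lA.map Prod.fst := List.mem_map_of_mem hq
    rw [hfstA] at this
    simpa using hmem q.1 this
  have hA := pv_scatter_getD (0 : Int) lA (List.replicate blocks.length (0 : Int)) j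
    (hfstA ▸ hnodup) hbndA (by simpa using hj)
  have hfind : lA.find? (fun q => q.1 == (j : Int)) = some ((j : Int), (k : Int)) := by
    rw [hlA, List.find?_map]
    have hcomp : ((fun q : Int × Int => q.1 == (j : Int)) ∘ (fun ip : Int × Int => (ip.2, ip.1)))
        = fun ip : Int × Int => ip.2 == (j : Int) := rfl
    rw [hcomp, pv_find?_enumerate (j : Int) P 0, hk]
    simp
  rw [hfind] at hA
  simp only [Option.map_some, Option.getD_some] at hA
  rw [hA, hk]
  simp only [Option.getD_some]

-- the two permutation applications coincide, given the raw reduced key digits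
lemma pv_branch_eq (blocks : List (List Char)) (encrypt : Bool) (raw : List Int)
    (hraw : ∀ v ∈ raw, 0 ≤ v ∧ v < (blocks.length : Int))
    (hlenK : (raw.length : Int) ≤ (pvKOD8_KEY.length : Int)) :
    (let sp := raw.foldl
        (fun st v => if PySem.Set.contains st.1 v then st else (PySem.Set.add st.1 v, st.2 ++ [v]))
        ((PySem.Set.empty : PySem.Set Int), ([] : List Int));
     let seen := sp.1;
     let perm := (PySem.List.pyRange 0 ((blocks.length : Int)) 1).foldl
        (fun acc i => if !(PySem.Set.contains seen i) then acc ++ [i] else acc) sp.2;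
     if encrypt then
        (PySem.List.pyRange 0 ((blocks.length : Int)) 1).map
          (fun i => PySem.List.pyGetD blocks (PySem.List.pyGetD perm i 0) [])
     else
        let inv := (PySem.List.enumerate perm 0).foldl
          (fun inv ip => PySem.List.pySetD inv ip.2 ip.1) (List.replicate blocks.length (0 : Int));
        (PySem.List.pyRange 0 ((blocks.length : Int)) 1).map
          (fun i => PySem.List.pyGetD blocks (PySem.List.pyGetD inv i 0) []))
    = (let rank : Int → Int := fun i =>
         match PySem.List.index? raw i with
         | some j => (j : Int)
         | none => (pvKOD8_KEY.length : Int) + i;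
       let perm := PySem.List.sorted (PySem.List.pyRange 0 ((blocks.length : Int)) 1) rank false;
       if encrypt then perm.map (fun p => PySem.List.pyGetD blocks p [])
       else (PySem.List.sorted (perm.zip blocks) (fun q => q.1) false).map (fun q => q.2)) := by
  dsimp only
  rw [show ((PySem.Set.empty : PySem.Set Int), ([] : List Int))
      = (([] : PySem.Set Int), ([] : List Int)) from rfl]
  rw [pv_dedup_fold raw []]
  rw [show PySem.Set.update ([] : PySem.Set Int) raw = PySem.Set.ofList raw from rfl]
  rw [PySem.List.foldl_append_if_eq_filter
    (fun i => !(PySem.Set.contains (PySem.Set.ofList raw) i))]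
  rw [pv_sorted_rank_eq blocks.length raw hraw hlenK]
  set P : List Int := PySem.Set.ofList raw ++
      (PySem.List.pyRange 0 ((blocks.length : Int)) 1).filter
        (fun x => !(PySem.Set.contains (PySem.Set.ofList raw) x)) with hP
  obtain ⟨hPnodup, hPlen, hPmem, hPfull⟩ := pv_perm_props blocks.length raw hraw
  rw [← hP] at hPnodup hPlen hPmem hPfull
  cases encrypt with
  | true =>
    simp only [if_true]
    have h1 : (PySem.List.pyRange 0 ((blocks.length : Int)) 1).map
        (fun i => PySem.List.pyGetD blocks (PySem.List.pyGetD P i 0) [])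
        = ((PySem.List.pyRange 0 ((P.length : Int)) 1).map
            (fun i => PySem.List.pyGetD P i 0)).map (fun p => PySem.List.pyGetD blocks p []) := by
      rw [List.map_map, hPlen]
      rfl
    rw [h1, PySem.List.map_pyGetD_pyRange_zero' P 0]
  | false =>
    simp only [Bool.false_eq_true, if_false]
    exact pv_decrypt_eq blocks P hPnodup hPlen hPmem hPfull

-- everything after the empty-text check, for a fixed nonempty padded string
lemma pv_core (padded : List Char) (encrypt : Bool) (bs : Int)
    (hpad : padded ≠ []) (hbs : 0 < bs) :
    (let blocks : List (List Char) :=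
        (PySem.List.pyRange 0 ((padded.length : Int)) bs).map
          (fun i => PySem.List.slice padded (some i) (some (i + bs)));
     let n : Int := (blocks.length : Int);
     let raw : List Int := pvKOD8_KEY.map (fun d => PySem.Int.mod ((d.toNat : Int) - 48) n);
     let sp := raw.foldl
       (fun st v => if PySem.Set.contains st.1 v then st else (PySem.Set.add st.1 v, st.2 ++ [v]))
       ((PySem.Set.empty : PySem.Set Int), ([] : List Int));
     let seen := sp.1;
     let perm := (PySem.List.pyRange 0 n 1).foldl
       (fun acc i => if !(PySem.Set.contains seen i) then acc ++ [i] else acc) sp.2;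
     let result_blocks :=
       if encrypt then
         (PySem.List.pyRange 0 n 1).map
           (fun i => PySem.List.pyGetD blocks (PySem.List.pyGetD perm i 0) [])
       else
         let inv := (PySem.List.enumerate perm 0).foldl
           (fun inv ip => PySem.List.pySetD inv ip.2 ip.1) (List.replicate blocks.length (0 : Int));
         (PySem.List.pyRange 0 n 1).map
           (fun i => PySem.List.pyGetD blocks (PySem.List.pyGetD inv i 0) []);
     let result := PySem.Chars.join [] result_blocks;
     if !encrypt then String.ofList ((result.reverse.dropWhile (fun c => c == '\x00')).reverse)
     else String.ofList result)
    = (let blocks : List (List Char) :=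
        (PySem.List.pyRange 0 ((padded.length : Int)) bs).map
          (fun i => PySem.List.slice padded (some i) (some (i + bs)));
       let n : Int := (blocks.length : Int);
       let digs : List Int := pvKOD8_KEY.map (fun d => PySem.Int.mod ((d.toNat : Int) - 48) n);
       let rank : Int → Int := fun i =>
         match PySem.List.index? digs i with
         | some j => (j : Int)
         | none => (pvKOD8_KEY.length : Int) + i;
       let perm : List Int := PySem.List.sorted (PySem.List.pyRange 0 n 1) rank false;
       if encrypt then
         String.ofList (PySem.Chars.join [] (perm.map (fun p => PySem.List.pyGetD blocks p [])))
       else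
         let pairs := PySem.List.sorted (perm.zip blocks) (fun q => q.1) false;
         let joined := PySem.Chars.join [] (pairs.map (fun q => q.2));
         String.ofList ((joined.reverse.dropWhile (fun c => c == '\x00')).reverse)) := by
  dsimp only
  set blocks : List (List Char) :=
      (PySem.List.pyRange 0 ((padded.length : Int)) bs).map
        (fun i => PySem.List.slice padded (some i) (some (i + bs))) with hblocks
  have hne : blocks ≠ [] := by
    have h0 : (0 : Int) ∈ PySem.List.pyRange 0 ((padded.length : Int)) bs := by
      refine (PySem.List.mem_pyRange_iff_of_pos hbs 0).mpr ⟨le_refl 0, ?_, ⟨0, by ring⟩⟩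
      exact_mod_cast List.length_pos_of_ne_nil hpad
    intro h
    rw [hblocks, List.map_eq_nil_iff] at h
    rw [h] at h0
    exact (List.not_mem_nil) h0
  have hn : 0 < ((blocks.length : Int)) := by
    have := List.length_pos_of_ne_nil hne
    exact_mod_cast this
  have hraw : ∀ v ∈ pvKOD8_KEY.map (fun d => PySem.Int.mod ((d.toNat : Int) - 48) ((blocks.length : Int))),
      0 ≤ v ∧ v < ((blocks.length : Int)) := by
    intro v hv
    obtain ⟨d, _, rfl⟩ := List.mem_map.mp hv
    exact ⟨PySem.Int.mod_nonneg _ hn, PySem.Int.mod_lt _ hn⟩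
  have hlenK : (((pvKOD8_KEY.map (fun d => PySem.Int.mod ((d.toNat : Int) - 48) ((blocks.length : Int)))).length : Int))
      ≤ (pvKOD8_KEY.length : Int) := by
    simp
  have key := pv_branch_eq blocks encrypt
    (pvKOD8_KEY.map (fun d => PySem.Int.mod ((d.toNat : Int) - 48) ((blocks.length : Int)))) hraw hlenK
  dsimp only at key
  cases encrypt with
  | true =>
    simp only [if_true, Bool.not_true, Bool.false_eq_true, if_false] at key ⊢
    rw [key]
  | false =>
    simp only [Bool.false_eq_true, if_false, Bool.not_false, if_true] at key ⊢
    rw [key]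

-- ===== VERDICT (by name: the statement is the Claim_ definition above) =====
theorem op_block_shuffle_spec : Claim_equal_op_block_shuffle := by
  intro text encrypt bs _hdom hpre
  unfold Spec_op_block_shuffle op_block_shuffle op_block_shuffle_alt
  by_cases hcs : text.toList = []
  · simp [hcs]
  · have hbs : 0 < bs := hpre.resolve_left hcs
    simp only [if_neg hcs]
    have hpad : text.toList ++ PySem.List.pyRepeat ['\x00']
        (PySem.Int.mod (-(text.toList.length : Int)) bs) ≠ [] := by
      intro h
      exact hcs (List.append_eq_nil_iff.mp h).1
    exact pv_core _ encrypt bs hpad hbs
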